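-- pv_equiv track=rewrite | github.com/joaoabcoelho/adventofcode2024 | 14/solve.py | check_robots
-- ===== SOURCE A (Python) =====
-- def check_robots(robs):
--
--   robset = set(robs)
--   for r in robset:
--     n = 0
--     for dx in range(-1,2):
--       for dy in range(-1,2):
--         if (r[0]+dx, r[1]+dy) in robset: n += 1
--     if n == 9: return True
--
--   return False
-- ===== SOURCE B (Python) =====
-- def check_robots(robs):
--   # Scatter pass: each robot votes for the 9 candidate centres it could serve
--   # as a neighbour of; a centre collecting 9 votes has its full 3x3 occupied.
--   robset = set(robs)
--   cells = [(x + dx, y + dy)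
--            for (x, y) in robset
--            for dx in range(-1, 2)
--            for dy in range(-1, 2)]
--   votes = {}
--   for c in cells:
--     votes[c] = votes.get(c, 0) + 1
--   return 9 in votes.values()
-- ===== Notes on version B (the rewrite author's own statement) =====
-- stated objective: alternative
-- what changed: Inverts A's per-robot gather (count the 9 neighbours of each robot in the set) into a scatter pass: every robot deposits one vote on each of the 9 cells it neighbours, the votes are accumulated in a dict, and a cell with 9 votes means its full 3x3 block is occupied.
import Mathlib
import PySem

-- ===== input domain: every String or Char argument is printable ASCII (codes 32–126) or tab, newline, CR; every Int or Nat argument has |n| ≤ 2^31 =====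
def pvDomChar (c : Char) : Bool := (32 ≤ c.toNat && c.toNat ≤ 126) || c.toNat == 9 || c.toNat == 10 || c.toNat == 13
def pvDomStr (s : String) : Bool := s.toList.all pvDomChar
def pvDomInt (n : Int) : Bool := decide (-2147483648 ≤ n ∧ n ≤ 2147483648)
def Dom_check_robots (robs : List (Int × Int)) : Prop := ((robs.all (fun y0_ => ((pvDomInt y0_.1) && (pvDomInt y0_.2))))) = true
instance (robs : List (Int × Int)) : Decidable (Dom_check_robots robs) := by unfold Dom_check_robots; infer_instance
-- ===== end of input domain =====

-- B replaces A's per-robot gather-and-count with a scatter pass into a vote counter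
-- (alternative decomposition, same asymptotic cost).

-- ===== PORT A =====
-- inner nested 'for dx/for dy' counting loop of A
def checkCountA (robset : PySem.Set (Int × Int)) (r : Int × Int) : Int :=
  (PySem.List.pyRange (-1) 2 1).foldl (fun n dx =>
    (PySem.List.pyRange (-1) 2 1).foldl (fun n dy =>
      if robset.contains (r.1 + dx, r.2 + dy) then n + 1 else n) n) 0

def check_robots (robs : List (Int × Int)) : Bool :=
  let robset : PySem.Set (Int × Int) := PySem.Set.ofList robs
  -- 'for r in robset: … if n == 9: return True / return False' = early-exit ∃ scan
  robset.any (fun r => checkCountA robset r == 9)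

-- ===== PORT B =====
def check_robots_alt (robs : List (Int × Int)) : Bool :=
  let robset : PySem.Set (Int × Int) := PySem.Set.ofList robs
  let cells := robset.flatMap (fun r =>
    (PySem.List.pyRange (-1) 2 1).flatMap (fun dx =>
      (PySem.List.pyRange (-1) 2 1).map (fun dy => (r.1 + dx, r.2 + dy))))
  let votes := cells.foldl (fun d c => d.insert c (d.getD c 0 + 1))
      (PySem.Dict.empty : PySem.Dict (Int × Int) Int)
  votes.values.contains 9

-- ===== PRECONDITION & SPEC =====
def Spec_check_robots (robs : List (Int × Int)) (out : Bool) : Prop := out = check_robots_alt robs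
instance (robs : List (Int × Int)) (out : Bool) : Decidable (Spec_check_robots robs out) := by unfold Spec_check_robots; infer_instance

-- ===== CLAIM (what is proved, stated in full; the proofs are below) =====
def Claim_equal_check_robots : Prop := ∀ (robs : List (Int × Int)), Dom_check_robots robs → Spec_check_robots robs (check_robots robs)

-- ===== LEMMAS AND PROOFS =====

-- the 9 cells of the 3x3 block centred at c, in A's and B's common scan order
def nbhd (c : Int × Int) : List (Int × Int) :=
  [(c.1 + -1, c.2 + -1), (c.1 + -1, c.2 + 0), (c.1 + -1, c.2 + 1),
   (c.1 + 0, c.2 + -1), (c.1 + 0, c.2 + 0), (c.1 + 0, c.2 + 1),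
   (c.1 + 1, c.2 + -1), (c.1 + 1, c.2 + 0), (c.1 + 1, c.2 + 1)]

def cellsOf (robs : List (Int × Int)) : List (Int × Int) :=
  (PySem.Set.ofList robs).flatMap nbhd

lemma pyRange3 : PySem.List.pyRange (-1) 2 1 = [-1, 0, 1] := by decide

lemma nbhd_nodup (c : Int × Int) : (nbhd c).Nodup := by
  simp [nbhd, Prod.ext_iff]

lemma nbhd_length (c : Int × Int) : (nbhd c).length = 9 := by simp [nbhd]

lemma self_mem_nbhd (c : Int × Int) : c ∈ nbhd c := by simp [nbhd]

lemma mem_nbhd_iff (a b : Int × Int) :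
    a ∈ nbhd b ↔ (b.1 - 1 ≤ a.1 ∧ a.1 ≤ b.1 + 1 ∧ b.2 - 1 ≤ a.2 ∧ a.2 ≤ b.2 + 1) := by
  simp [nbhd, Prod.ext_iff]
  omega

lemma mem_nbhd_symm (a b : Int × Int) : a ∈ nbhd b ↔ b ∈ nbhd a := by
  rw [mem_nbhd_iff, mem_nbhd_iff]
  omega

lemma flatMap_pyRange_eq_nbhd (r : Int × Int) :
    (PySem.List.pyRange (-1) 2 1).flatMap (fun dx =>
      (PySem.List.pyRange (-1) 2 1).map (fun dy => (r.1 + dx, r.2 + dy))) = nbhd r := rfl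

lemma countA_eq9 (s : PySem.Set (Int × Int)) (r : Int × Int) :
    (checkCountA s r == 9) = (nbhd r).all (fun d => s.contains d) := by
  simp only [checkCountA, pyRange3, List.foldl_cons, List.foldl_nil, nbhd,
    List.all_cons, List.all_nil]
  generalize PySem.Set.contains s (r.1 + -1, r.2 + -1) = b1
  generalize PySem.Set.contains s (r.1 + -1, r.2 + 0) = b2
  generalize PySem.Set.contains s (r.1 + -1, r.2 + 1) = b3
  generalize PySem.Set.contains s (r.1 + 0, r.2 + -1) = b4
  generalize PySem.Set.contains s (r.1 + 0, r.2 + 0) = b5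
  generalize PySem.Set.contains s (r.1 + 0, r.2 + 1) = b6
  generalize PySem.Set.contains s (r.1 + 1, r.2 + -1) = b7
  generalize PySem.Set.contains s (r.1 + 1, r.2 + 0) = b8
  generalize PySem.Set.contains s (r.1 + 1, r.2 + 1) = b9
  revert b1 b2 b3 b4 b5 b6 b7 b8 b9
  decide

lemma count_nbhd_ite (r c : Int × Int) :
    (nbhd r).count c = if c ∈ nbhd r then 1 else 0 := by
  split
  · exact List.count_eq_one_of_mem (nbhd_nodup r) ‹_›
  · exact List.count_eq_zero.mpr ‹_›

lemma count_cellsOf (robs : List (Int × Int)) (c : Int × Int) :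
    (cellsOf robs).count c
      = (PySem.Set.ofList robs).countP (fun r => decide (r ∈ nbhd c)) := by
  rw [cellsOf, List.count_flatMap]
  induction PySem.Set.ofList robs with
  | nil => simp
  | cons x t ih =>
      simp only [List.map_cons, List.sum_cons, List.countP_cons, Function.comp_apply, ih,
        count_nbhd_ite, mem_nbhd_symm x c]
      by_cases h : c ∈ nbhd x <;> simp [h] <;> omega

-- a cell c of the grid got 9 votes iff every cell of its 3x3 block is a robot position
lemma countP_eq_nine_iff (s : List (Int × Int)) (hs : s.Nodup) (c : Int × Int) :
    s.countP (fun r => decide (r ∈ nbhd c)) = 9 ↔ ∀ d ∈ nbhd c, d ∈ s := by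
  classical
  have hfil : s.countP (fun r => decide (r ∈ nbhd c)) = (List.filter (fun r => decide (r ∈ nbhd c)) s).length := by
    simp [List.countP_eq_length_filter]
  have hnodupF : (List.filter (fun r => decide (r ∈ nbhd c)) s).Nodup := hs.filter _
  have hcardF : (List.filter (fun r => decide (r ∈ nbhd c)) s).toFinset.card
      = (List.filter (fun r => decide (r ∈ nbhd c)) s).length :=
    List.toFinset_card_of_nodup hnodupF
  have hsubF : (List.filter (fun r => decide (r ∈ nbhd c)) s).toFinset ⊆ (nbhd c).toFinset := by
    intro x hx
    simp only [List.mem_toFinset, List.mem_filter, decide_eq_true_eq] at hx ⊢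
    exact hx.2
  have hcardN : (nbhd c).toFinset.card = 9 := by
    rw [List.toFinset_card_of_nodup (nbhd_nodup c), nbhd_length]
  constructor
  · intro h9 d hd
    have : (List.filter (fun r => decide (r ∈ nbhd c)) s).toFinset = (nbhd c).toFinset := by
      apply Finset.eq_of_subset_of_card_le hsubF
      omega
    have : d ∈ (List.filter (fun r => decide (r ∈ nbhd c)) s).toFinset := by
      rw [this]; simpa using hd
    simp only [List.mem_toFinset, List.mem_filter] at this
    exact this.1
  · intro hall
    rw [hfil, ← hcardF]
    have : (nbhd c).toFinset ⊆ (List.filter (fun r => decide (r ∈ nbhd c)) s).toFinset := by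
      intro x hx
      simp only [List.mem_toFinset] at hx
      simp only [List.mem_toFinset, List.mem_filter, decide_eq_true_eq]
      exact ⟨hall x hx, hx⟩
    have heq := Finset.eq_of_subset_of_card_le this (Finset.card_le_card hsubF)
    rw [← heq]
    exact hcardN

-- "the full 3x3 block around x is occupied"
def Full (robs : List (Int × Int)) (x : Int × Int) : Prop := ∀ d ∈ nbhd x, d ∈ robs

lemma checkA_iff (robs : List (Int × Int)) :
    check_robots robs = true ↔ ∃ r ∈ robs, Full robs r := by
  simp only [check_robots, List.any_eq_true, countA_eq9, List.all_eq_true, Full]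
  constructor
  · rintro ⟨r, hr, h⟩
    refine ⟨r, (PySem.Set.mem_ofList robs r).mp hr, fun d hd => ?_⟩
    have := h d hd
    simpa [PySem.Set.contains, PySem.Set.mem_ofList] using this
  · rintro ⟨r, hr, h⟩
    refine ⟨r, (PySem.Set.mem_ofList robs r).mpr hr, fun d hd => ?_⟩
    simpa [PySem.Set.contains, PySem.Set.mem_ofList] using h d hd

lemma checkB_iff (robs : List (Int × Int)) :
    check_robots_alt robs = true ↔ ∃ c ∈ cellsOf robs, Full robs c := by
  have hcells : (PySem.Set.ofList robs).flatMap (fun r =>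
      (PySem.List.pyRange (-1) 2 1).flatMap (fun dx =>
        (PySem.List.pyRange (-1) 2 1).map (fun dy => (r.1 + dx, r.2 + dy)))) = cellsOf robs := by
    simp only [flatMap_pyRange_eq_nbhd, cellsOf]
  simp only [check_robots_alt, hcells, PySem.Dict.foldl_insert_getD_add_one_eq_counter,
    PySem.Dict.values, PySem.Dict.items_counter, List.map_map, List.contains_iff_mem,
    List.mem_map, Function.comp_apply]
  constructor
  · rintro ⟨c, hc, hv⟩
    have h9 : (cellsOf robs).count c = 9 := by
      have : ((cellsOf robs).count c : Int) = 9 := hv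
      omega
    rw [count_cellsOf] at h9
    have hfull := (countP_eq_nine_iff _ (PySem.Set.nodup_ofList robs) c).mp h9
    refine ⟨c, (PySem.Set.mem_ofList _ c).mp hc, fun d hd => ?_⟩
    exact (PySem.Set.mem_ofList robs d).mp (hfull d hd)
  · rintro ⟨c, hc, hfull⟩
    refine ⟨c, (PySem.Set.mem_ofList _ c).mpr hc, ?_⟩
    have h9 : (cellsOf robs).count c = 9 := by
      rw [count_cellsOf]
      exact (countP_eq_nine_iff _ (PySem.Set.nodup_ofList robs) c).mpr
        (fun d hd => (PySem.Set.mem_ofList robs d).mpr (hfull d hd))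
    rw [h9]; rfl

lemma exists_full_shift (robs : List (Int × Int)) :
    (∃ r ∈ robs, Full robs r) ↔ ∃ c ∈ cellsOf robs, Full robs c := by
  constructor
  · rintro ⟨r, hr, h⟩
    refine ⟨r, ?_, h⟩
    simp only [cellsOf, List.mem_flatMap]
    exact ⟨r, (PySem.Set.mem_ofList robs r).mpr hr, self_mem_nbhd r⟩
  · rintro ⟨c, _, h⟩
    exact ⟨c, h c (self_mem_nbhd c), h⟩

-- ===== VERDICT (by name: the statement is the Claim_ definition above) =====
theorem check_robots_spec : Claim_equal_check_robots := by
  intro robs _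
  unfold Spec_check_robots
  have h : check_robots robs = true ↔ check_robots_alt robs = true := by
    rw [checkA_iff, checkB_iff]
    exact exists_full_shift robs
  cases hA : check_robots robs <;> cases hB : check_robots_alt robs <;> simp_all
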